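-- pv_equiv track=rewrite | github.com/joeygaitan/spaceMan | game.py | secret_word_dictionary_matrix_builder
-- ===== SOURCE A (Python) =====
-- def secret_word_dictionary_matrix_builder(secret_word, letters_guessed):
--     """
--     This function builds a matrix dictionary with two for loops filtering the secret_word string
--     into keys for the dictionary. Then it adds a number value for letters found in the list. This is
--     useful potentially for catching multiple duplicates or finding missing element.
--     """
--     # this is a dictionary to help check for inputs to  see if you won or not
--     secretDictionary = {}
--     # this for loop looks for characters key values  that arent in the dictionary ("a": 0)
--     for letter in secret_word:
--         if letter not in secretDictionary:
--             secretDictionary[letter] = 0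
--     #This is for counting the guessed letters. It adds them into the key value
--         for guessLetter in letters_guessed:
--             if letter == guessLetter:
--                 secretDictionary[letter] += 1
--     return secretDictionary
-- ===== SOURCE B (Python) =====
-- def secret_word_dictionary_matrix_builder(secret_word, letters_guessed):
--     # One pass over secret_word builds the result keys (first-appearance order)
--     # and a letter->occurrence-count table; one pass over letters_guessed then
--     # adds the secret-occurrence count per matching guess.
--     result = {}
--     counts = {}
--     for letter in secret_word:
--         if letter not in result:
--             result[letter] = 0
--         counts[letter] = counts.get(letter, 0) + 1
--     for g in letters_guessed:
--         if g in result: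
--             result[g] += counts[g]
--     return result
-- ===== Notes on version B (the rewrite author's own statement) =====
-- stated objective: faster
-- what changed: Replaces A's rescan of letters_guessed for every character of secret_word by two independent single passes: one over secret_word building the result keys and an occurrence-count table, one over letters_guessed adding the secret-occurrence count per matching guess.
import Mathlib
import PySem

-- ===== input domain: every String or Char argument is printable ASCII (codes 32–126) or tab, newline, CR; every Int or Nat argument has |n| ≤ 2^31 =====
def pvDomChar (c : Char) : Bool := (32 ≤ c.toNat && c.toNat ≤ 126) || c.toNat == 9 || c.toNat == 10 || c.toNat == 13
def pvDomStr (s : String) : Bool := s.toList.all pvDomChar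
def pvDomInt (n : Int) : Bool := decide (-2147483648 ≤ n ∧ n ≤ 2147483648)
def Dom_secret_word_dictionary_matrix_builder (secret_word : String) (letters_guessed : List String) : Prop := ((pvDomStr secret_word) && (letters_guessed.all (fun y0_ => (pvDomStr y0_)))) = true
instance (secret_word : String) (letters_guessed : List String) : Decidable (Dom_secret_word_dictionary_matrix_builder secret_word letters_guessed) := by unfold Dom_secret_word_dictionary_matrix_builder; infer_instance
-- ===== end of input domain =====

-- B replaces A's per-secret-letter rescan of letters_guessed by one pass over each input
-- (result keys + occurrence counts from secret_word, then one pass over the guesses): alternative single-pass decomposition.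

-- ===== PORT A =====
def secret_word_dictionary_matrix_builder (secret_word : String) (letters_guessed : List String) : List (String × Int) :=
  (secret_word.toList.foldl (fun d c =>
      let letter := String.singleton c
      let d := if d.contains letter then d else d.insert letter (0 : Int)
      letters_guessed.foldl (fun d g => if letter == g then d.modify letter 0 (· + 1) else d) d)
    PySem.Dict.empty).items

-- ===== PORT B =====
def secret_word_dictionary_matrix_builder_alt (secret_word : String) (letters_guessed : List String) : List (String × Int) :=
  let p := secret_word.toList.foldl
    (fun (p : PySem.Dict String Int × PySem.Dict String Int) c =>
      let letter := String.singleton c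
      (if p.1.contains letter then p.1 else p.1.insert letter (0 : Int),
       p.2.insert letter (p.2.getD letter 0 + 1)))
    (PySem.Dict.empty, PySem.Dict.empty)
  (letters_guessed.foldl (fun d g => if d.contains g then d.modify g 0 (· + p.2.getD g 0) else d) p.1).items

-- ===== PRECONDITION & SPEC =====
def Spec_secret_word_dictionary_matrix_builder (secret_word : String) (letters_guessed : List String) (out : List (String × Int)) : Prop := out = secret_word_dictionary_matrix_builder_alt secret_word letters_guessed
instance (secret_word : String) (letters_guessed : List String) (out : List (String × Int)) : Decidable (Spec_secret_word_dictionary_matrix_builder secret_word letters_guessed out) := by unfold Spec_secret_word_dictionary_matrix_builder; infer_instance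

-- ===== CLAIM (what is proved, stated in full; the proofs are below) =====
def Claim_equal_secret_word_dictionary_matrix_builder : Prop := ∀ (secret_word : String) (letters_guessed : List String), Dom_secret_word_dictionary_matrix_builder secret_word letters_guessed → Spec_secret_word_dictionary_matrix_builder secret_word letters_guessed (secret_word_dictionary_matrix_builder secret_word letters_guessed)

-- ===== LEMMAS AND PROOFS =====

-- the common "insert 0 if absent" step: it contains l afterwards, adds l to the keys, keeps getD-at-0
theorem contains_step0 (d : PySem.Dict String Int) (l : String) :
    (if d.contains l then d else d.insert l (0 : Int)).contains l = true := by
  split_ifs with h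
  · exact h
  · exact PySem.Dict.contains_insert_self d l 0

theorem keys_step0 (d : PySem.Dict String Int) (l : String) :
    (if d.contains l then d else d.insert l (0 : Int)).keys = PySem.Set.add d.keys l := by
  by_cases h : d.contains l
  · have hm : l ∈ d.keys := (PySem.Dict.contains_iff_mem_keys d l).mp h
    simp [h, PySem.Set.add, PySem.Set.contains, hm]
  · have h' : d.contains l = false := by simpa using h
    have hm : l ∉ d.keys := fun hm => h ((PySem.Dict.contains_iff_mem_keys d l).mpr hm)
    simp [h', PySem.Dict.keys_insert_of_not_contains d _ h', PySem.Set.add, PySem.Set.contains, hm]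

theorem getD_step0 (d : PySem.Dict String Int) (l k : String) :
    (if d.contains l then d else d.insert l (0 : Int)).getD k 0 = d.getD k 0 := by
  by_cases h : d.contains l
  · simp [h]
  · have h' : d.contains l = false := by simpa using h
    simp only [h', Bool.false_eq_true, if_false]
    rw [PySem.Dict.getD_insert]
    split_ifs with hk
    · subst hk; exact (PySem.Dict.getD_of_not_contains d 0 h').symm
    · rfl

-- A's inner loop over the guesses (l already a key): keys unchanged, value at l grows by gl.count l.
theorem innerA_keys (gl : List String) (d : PySem.Dict String Int) (l : String)
    (h : d.contains l = true) :
    (gl.foldl (fun d g => if l == g then d.modify l 0 (· + 1) else d) d).keys = d.keys := by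
  induction gl generalizing d with
  | nil => rfl
  | cons g gl ih =>
    simp only [List.foldl_cons]
    split_ifs with hg
    · rw [ih _ (by simp [PySem.Dict.contains_modify, h])]
      rw [PySem.Dict.keys_modify, PySem.Dict.keys_insert_of_contains d _ h]
    · exact ih d h

theorem innerA_getD (gl : List String) (d : PySem.Dict String Int) (l k : String) :
    (gl.foldl (fun d g => if l == g then d.modify l 0 (· + 1) else d) d).getD k 0 =
      d.getD k 0 + (if k = l then (gl.count l : Int) else 0) := by
  induction gl generalizing d with
  | nil => simp
  | cons g gl ih =>
    simp only [List.foldl_cons]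
    by_cases hgl : g = l
    · subst hgl
      rw [if_pos (by simp), ih, PySem.Dict.getD_modify]
      by_cases hk : k = g
      · subst hk
        rw [if_pos rfl, if_pos rfl, if_pos rfl]
        simp only [List.count_cons, beq_self_eq_true, if_pos]
        push_cast; ring
      · rw [if_neg hk, if_neg hk, if_neg hk]
    · rw [if_neg (show ¬ ((l == g) = true) by simpa using fun h : l = g => hgl h.symm), ih]
      by_cases hk : k = l
      · subst hk
        rw [if_pos rfl, if_pos rfl]
        have : ¬ ((g == k) = true) := by simpa using fun h => hgl h
        simp [List.count_cons, this]
      · rw [if_neg hk, if_neg hk]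

theorem foldl_pair {α β γ : Type} (ls : List γ) (f : α → γ → α) (g : β → γ → β) (a : α) (b : β) :
    (ls.foldl (fun p x => (f p.1 x, g p.2 x)) (a, b)) = (ls.foldl f a, ls.foldl g b) := by
  induction ls generalizing a b with
  | nil => rfl
  | cons x ls ih => simp [List.foldl_cons, ih]

-- A's outer loop: keys and values.
theorem outerA_keys (gl ls : List String) (d : PySem.Dict String Int) :
    (ls.foldl (fun d l =>
        gl.foldl (fun d g => if l == g then d.modify l 0 (· + 1) else d)
          (if d.contains l then d else d.insert l (0 : Int))) d).keys =
      PySem.Set.update d.keys ls := by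
  induction ls generalizing d with
  | nil => rfl
  | cons l ls ih =>
    simp only [List.foldl_cons, PySem.Set.update]
    rw [ih]
    rw [innerA_keys _ _ _ (contains_step0 d l), keys_step0]
    rfl

theorem outerA_getD (gl ls : List String) (d : PySem.Dict String Int) (k : String) :
    (ls.foldl (fun d l =>
        gl.foldl (fun d g => if l == g then d.modify l 0 (· + 1) else d)
          (if d.contains l then d else d.insert l (0 : Int))) d).getD k 0 =
      d.getD k 0 + (ls.count k : Int) * (gl.count k : Int) := by
  induction ls generalizing d with
  | nil => simp
  | cons l ls ih =>
    simp only [List.foldl_cons]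
    rw [ih, innerA_getD, getD_step0]
    by_cases hk : k = l
    · subst hk
      rw [if_pos rfl]
      simp only [List.count_cons, beq_self_eq_true, if_pos]
      push_cast; ring
    · rw [if_neg hk]
      have : ¬ ((l == k) = true) := by simpa using fun h => hk h.symm
      simp only [List.count_cons, this, add_zero]
      push_cast; ring

-- B's first pass (result component): keys and values.
theorem B0_keys (ls : List String) (d : PySem.Dict String Int) :
    (ls.foldl (fun d l => if d.contains l then d else d.insert l (0 : Int)) d).keys =
      PySem.Set.update d.keys ls := by
  induction ls generalizing d with
  | nil => rfl
  | cons l ls ih =>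
    simp only [List.foldl_cons, PySem.Set.update]
    rw [ih, keys_step0]
    rfl

theorem B0_getD (ls : List String) (d : PySem.Dict String Int) (k : String) :
    (ls.foldl (fun d l => if d.contains l then d else d.insert l (0 : Int)) d).getD k 0 =
      d.getD k 0 := by
  induction ls generalizing d with
  | nil => rfl
  | cons l ls ih =>
    simp only [List.foldl_cons]
    rw [ih, getD_step0]

-- B's second pass: keys unchanged, value at contained keys grows by gl.count k * C k.
theorem B2_keys (C : String → Int) (gl : List String) (d : PySem.Dict String Int) :
    (gl.foldl (fun d g => if d.contains g then d.modify g 0 (· + C g) else d) d).keys = d.keys := by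
  induction gl generalizing d with
  | nil => rfl
  | cons g gl ih =>
    simp only [List.foldl_cons]
    split_ifs with hg
    · rw [ih, PySem.Dict.keys_modify, PySem.Dict.keys_insert_of_contains d _ hg]
    · exact ih d

theorem B2_getD (C : String → Int) (gl : List String) (d : PySem.Dict String Int) (k : String) :
    (gl.foldl (fun d g => if d.contains g then d.modify g 0 (· + C g) else d) d).getD k 0 =
      d.getD k 0 + (if d.contains k then (gl.count k : Int) * C k else 0) := by
  induction gl generalizing d with
  | nil => simp
  | cons g gl ih =>
    simp only [List.foldl_cons]
    by_cases hg : d.contains g = true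
    · rw [if_pos hg, ih, PySem.Dict.getD_modify]
      have hc : (d.modify g 0 (· + C g)).contains k = d.contains k := by
        rw [PySem.Dict.contains_modify]
        by_cases hk : k = g
        · subst hk; simp [hg]
        · simp [hk]
      rw [hc]
      by_cases hk : k = g
      · subst hk
        rw [if_pos rfl, if_pos hg, if_pos hg]
        simp only [List.count_cons, beq_self_eq_true, if_pos]
        push_cast; ring
      · rw [if_neg hk]
        have : ¬ ((g == k) = true) := by simpa using fun h => hk h.symm
        by_cases hdk : d.contains k = true
        · rw [if_pos hdk, if_pos hdk]
          simp [List.count_cons, this]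
        · rw [if_neg hdk, if_neg hdk]
    · rw [if_neg hg, ih]
      by_cases hk : k = g
      · subst hk
        rw [if_neg hg, if_neg hg]
      · have : ¬ ((g == k) = true) := by simpa using fun h => hk h.symm
        by_cases hdk : d.contains k = true
        · rw [if_pos hdk, if_pos hdk]
          simp [List.count_cons, this]
        · rw [if_neg hdk, if_neg hdk]

-- ===== VERDICT (by name: the statement is the Claim_ definition above) =====
theorem secret_word_dictionary_matrix_builder_spec : Claim_equal_secret_word_dictionary_matrix_builder := by
  intro sw gl _
  unfold Spec_secret_word_dictionary_matrix_builder
  unfold secret_word_dictionary_matrix_builder secret_word_dictionary_matrix_builder_alt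
  simp only []
  have hsplit : List.foldl
      (fun (p : PySem.Dict String Int × PySem.Dict String Int) c =>
        (if p.1.contains (String.singleton c) then p.1 else p.1.insert (String.singleton c) (0 : Int),
         p.2.insert (String.singleton c) (p.2.getD (String.singleton c) 0 + 1)))
      (PySem.Dict.empty, PySem.Dict.empty) sw.toList =
      (List.foldl (fun d c => if d.contains (String.singleton c) then d else d.insert (String.singleton c) (0 : Int)) PySem.Dict.empty sw.toList,
       List.foldl (fun d c => d.insert (String.singleton c) (d.getD (String.singleton c) 0 + 1)) PySem.Dict.empty sw.toList) :=
    foldl_pair sw.toList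
      (fun d c => if d.contains (String.singleton c) then d else d.insert (String.singleton c) (0 : Int))
      (fun (d : PySem.Dict String Int) c => d.insert (String.singleton c) (d.getD (String.singleton c) 0 + 1))
      PySem.Dict.empty PySem.Dict.empty
  rw [hsplit]
  have h1 : List.foldl
      (fun d c =>
        List.foldl (fun d g => if String.singleton c == g then d.modify (String.singleton c) 0 (· + 1) else d)
          (if d.contains (String.singleton c) then d else d.insert (String.singleton c) (0 : Int)) gl)
      PySem.Dict.empty sw.toList =
      List.foldl (fun d l =>
        List.foldl (fun d g => if l == g then d.modify l 0 (· + 1) else d)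
          (if d.contains l then d else d.insert l (0 : Int)) gl)
      PySem.Dict.empty (sw.toList.map String.singleton) :=
    by rw [List.foldl_map]
  have h2 : List.foldl
      (fun d c => if d.contains (String.singleton c) then d else d.insert (String.singleton c) (0 : Int))
      PySem.Dict.empty sw.toList =
      List.foldl (fun d l => if d.contains l then d else d.insert l (0 : Int))
      PySem.Dict.empty (sw.toList.map String.singleton) :=
    by rw [List.foldl_map]
  have h3 : List.foldl
      (fun (d : PySem.Dict String Int) c => d.insert (String.singleton c) (d.getD (String.singleton c) 0 + 1))
      PySem.Dict.empty sw.toList =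
      List.foldl (fun (d : PySem.Dict String Int) l => d.insert l (d.getD l 0 + 1))
      PySem.Dict.empty (sw.toList.map String.singleton) :=
    by rw [List.foldl_map]
  rw [h1, h2, h3]
  set ls := sw.toList.map String.singleton with hls
  set cnt : PySem.Dict String Int := ls.foldl (fun d l => d.insert l (d.getD l 0 + 1)) PySem.Dict.empty with hcnt
  set dA := ls.foldl (fun d l =>
      gl.foldl (fun d g => if l == g then d.modify l 0 (· + 1) else d)
        (if d.contains l then d else d.insert l (0 : Int))) PySem.Dict.empty with hdA
  set d0 := ls.foldl (fun d l => if d.contains l then d else d.insert l (0 : Int))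
      PySem.Dict.empty with hd0
  set dB := gl.foldl (fun d g => if d.contains g then d.modify g 0 (· + cnt.getD g 0) else d) d0
    with hdB
  have hkeys0 : d0.keys = PySem.Set.ofList ls := by
    rw [hd0, B0_keys]; rfl
  have hkeysA : dA.keys = PySem.Set.ofList ls := by
    rw [hdA, outerA_keys]; rfl
  have hkeysB : dB.keys = PySem.Set.ofList ls := by
    rw [hdB, B2_keys, hkeys0]
  have hcontains0 : ∀ k, d0.contains k = true ↔ k ∈ ls := by
    intro k
    rw [PySem.Dict.contains_iff_mem_keys, hkeys0, PySem.Set.mem_ofList]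
  have hcntD : ∀ k, cnt.getD k 0 = (ls.count k : Int) := by
    intro k
    rw [hcnt, PySem.Dict.getD_foldl_insert_add_one]
    simp
  have hgetD : ∀ k, dA.getD k 0 = dB.getD k 0 := by
    intro k
    rw [hdA, outerA_getD, hdB, B2_getD, B0_getD]
    by_cases hk : k ∈ ls
    · rw [if_pos ((hcontains0 k).mpr hk), hcntD]
      ring
    · have h0 : d0.contains k = false := by
        cases h : d0.contains k
        · rfl
        · exact absurd ((hcontains0 k).mp h) hk
      rw [h0]
      have : ls.count k = 0 := List.count_eq_zero.mpr hk
      simp [this]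
  rw [PySem.Dict.items_eq_map_keys dA (by rw [hkeysA]; exact PySem.Set.nodup_ofList ls) 0,
      PySem.Dict.items_eq_map_keys dB (by rw [hkeysB]; exact PySem.Set.nodup_ofList ls) 0,
      hkeysA, hkeysB]
  exact List.map_congr_left (fun k _ => by rw [hgetD k])
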